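-- pv_equiv track=rewrite | github.com/FrnkMrz/pcap2llm | src/pcap2llm/visualize.py | _phase_kind
-- ===== SOURCE A (Python) =====
-- def _phase_kind(event_name: str, status: str, profile_family: str) -> tuple[str, str]:
--     lowered = event_name.lower()
--
--     if profile_family == "5g":
--         if any(token in lowered for token in ("registration", "initial ue", "ng setup")):
--             return ("registration", "Registration")
--         if any(token in lowered for token in ("nsmf", "createsmcontext", "pdu session", "pfcp")):
--             return ("session_setup", "Session Setup")
--     elif profile_family == "lte":
--         if any(token in lowered for token in ("attach", "initial ue", "downlink nas transport")):
--             return ("registration", "Registration")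
--         if any(token in lowered for token in ("create session", "modify bearer", "gtpv2")):
--             return ("session_setup", "Session Setup")
--     elif profile_family == "ims":
--         if any(token in lowered for token in ("register", "401", "407", "challenge")):
--             return ("authentication", "Authentication")
--         if any(token in lowered for token in ("invite", "183", "180", "200 ok", "bye")):
--             return ("signaling", "Call Signaling")
--
--     if any(token in lowered for token in ("reject", "fail", "error", "timeout", "401", "403", "500")):
--         return ("failure", "Failure / Retry")
--     if any(token in lowered for token in ("auth", "air", "aia", "aka", "eap")):
--         return ("authentication", "Authentication")
--     if any(token in lowered for token in ("security", "smc", "security mode")):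
--         return ("security", "Security Mode")
--     if any(token in lowered for token in ("session", "createsmcontext", "create session", "pfcp")):
--         return ("session_setup", "Session Setup")
--     if any(token in lowered for token in ("register", "attach", "initial ue")):
--         return ("registration", "Registration")
--     if any(token in lowered for token in ("release", "detach", "delete session")):
--         return ("release", "Release")
--     if status == "error":
--         return ("failure", "Failure / Retry")
--     return ("signaling", "Signaling")
-- ===== SOURCE B (Python) =====
-- # B: inverted token index with min-priority accumulator scan instead of an if-cascade.
--
-- _GENERIC_RULES = [
--     (("reject", "fail", "error", "timeout", "401", "403", "500"), ("failure", "Failure / Retry")),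
--     (("auth", "air", "aia", "aka", "eap"), ("authentication", "Authentication")),
--     (("security", "smc", "security mode"), ("security", "Security Mode")),
--     (("session", "createsmcontext", "create session", "pfcp"), ("session_setup", "Session Setup")),
--     (("register", "attach", "initial ue"), ("registration", "Registration")),
--     (("release", "detach", "delete session"), ("release", "Release")),
-- ]
--
-- _FAMILY_RULES = {
--     "5g": [
--         (("registration", "initial ue", "ng setup"), ("registration", "Registration")),
--         (("nsmf", "createsmcontext", "pdu session", "pfcp"), ("session_setup", "Session Setup")),
--     ],
--     "lte": [
--         (("attach", "initial ue", "downlink nas transport"), ("registration", "Registration")),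
--         (("create session", "modify bearer", "gtpv2"), ("session_setup", "Session Setup")),
--     ],
--     "ims": [
--         (("register", "401", "407", "challenge"), ("authentication", "Authentication")),
--         (("invite", "183", "180", "200 ok", "bye"), ("signaling", "Call Signaling")),
--     ],
-- }
--
--
-- def _token_index(profile_family):
--     # flat inverted index: one (token, priority, result) entry per token,
--     # priority = position of its rule (family rules first, then generic ones)
--     return [
--         (token, prio, result)
--         for prio, (tokens, result) in enumerate(_FAMILY_RULES.get(profile_family, []) + _GENERIC_RULES)
--         for token in tokens
--     ]
--
--
-- def _phase_kind(event_name: str, status: str, profile_family: str) -> tuple[str, str]: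
--     lowered = event_name.lower()
--     best = None
--     for token, prio, result in _token_index(profile_family):
--         if (best is None or prio < best[0]) and token in lowered:
--             best = (prio, result)
--     if best is None:
--         return ("failure", "Failure / Retry") if status == "error" else ("signaling", "Signaling")
--     return best[1]
-- ===== Notes on version B (the rewrite author's own statement) =====
-- stated objective: alternative
-- what changed: Replaced the hand-written if-elif cascade of any() checks by a flat inverted token index (one (token, priority, result) entry per token, family rules first) scanned once with a min-priority accumulator; the first-matching-rule semantics becomes minimum rule priority among matching tokens.
import Mathlib
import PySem

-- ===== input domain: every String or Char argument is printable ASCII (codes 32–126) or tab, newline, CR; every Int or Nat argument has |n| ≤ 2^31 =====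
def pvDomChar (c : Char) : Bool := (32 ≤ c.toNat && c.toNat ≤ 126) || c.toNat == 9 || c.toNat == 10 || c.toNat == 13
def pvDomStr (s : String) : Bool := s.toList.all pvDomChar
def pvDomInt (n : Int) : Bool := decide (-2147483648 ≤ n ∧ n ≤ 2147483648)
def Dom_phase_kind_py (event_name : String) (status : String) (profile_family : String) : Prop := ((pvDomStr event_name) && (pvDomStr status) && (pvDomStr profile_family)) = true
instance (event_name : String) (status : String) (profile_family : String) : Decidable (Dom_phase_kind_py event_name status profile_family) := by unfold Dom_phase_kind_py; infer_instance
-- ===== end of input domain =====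

-- B replaces A's if-cascade by a flat inverted token index (token, priority, result) scanned once
-- with a min-priority accumulator (objective: alternative, same cost).

-- ===== PORT A =====
-- helper: the generic tail of A's cascade, reached when no family-specific rule fired
def pvGenericA (lowered : String) (status : String) : String × String :=
  if ["reject", "fail", "error", "timeout", "401", "403", "500"].any (fun t => PySem.Str.isIn t lowered) then ("failure", "Failure / Retry")
  else if ["auth", "air", "aia", "aka", "eap"].any (fun t => PySem.Str.isIn t lowered) then ("authentication", "Authentication")
  else if ["security", "smc", "security mode"].any (fun t => PySem.Str.isIn t lowered) then ("security", "Security Mode")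
  else if ["session", "createsmcontext", "create session", "pfcp"].any (fun t => PySem.Str.isIn t lowered) then ("session_setup", "Session Setup")
  else if ["register", "attach", "initial ue"].any (fun t => PySem.Str.isIn t lowered) then ("registration", "Registration")
  else if ["release", "detach", "delete session"].any (fun t => PySem.Str.isIn t lowered) then ("release", "Release")
  else if status == "error" then ("failure", "Failure / Retry")
  else ("signaling", "Signaling")

def phase_kind_py (event_name : String) (status : String) (profile_family : String) : String × String :=
  let lowered := PySem.Str.lower event_name
  if profile_family == "5g" then
    if ["registration", "initial ue", "ng setup"].any (fun t => PySem.Str.isIn t lowered) then ("registration", "Registration")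
    else if ["nsmf", "createsmcontext", "pdu session", "pfcp"].any (fun t => PySem.Str.isIn t lowered) then ("session_setup", "Session Setup")
    else pvGenericA lowered status
  else if profile_family == "lte" then
    if ["attach", "initial ue", "downlink nas transport"].any (fun t => PySem.Str.isIn t lowered) then ("registration", "Registration")
    else if ["create session", "modify bearer", "gtpv2"].any (fun t => PySem.Str.isIn t lowered) then ("session_setup", "Session Setup")
    else pvGenericA lowered status
  else if profile_family == "ims" then
    if ["register", "401", "407", "challenge"].any (fun t => PySem.Str.isIn t lowered) then ("authentication", "Authentication")
    else if ["invite", "183", "180", "200 ok", "bye"].any (fun t => PySem.Str.isIn t lowered) then ("signaling", "Call Signaling")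
    else pvGenericA lowered status
  else pvGenericA lowered status

-- ===== PORT B =====
def pvGenericRules : List (List String × (String × String)) :=
  [ (["reject", "fail", "error", "timeout", "401", "403", "500"], ("failure", "Failure / Retry")),
    (["auth", "air", "aia", "aka", "eap"], ("authentication", "Authentication")),
    (["security", "smc", "security mode"], ("security", "Security Mode")),
    (["session", "createsmcontext", "create session", "pfcp"], ("session_setup", "Session Setup")),
    (["register", "attach", "initial ue"], ("registration", "Registration")),
    (["release", "detach", "delete session"], ("release", "Release")) ]

def pvFamilyRules : PySem.Dict String (List (List String × (String × String))) :=
  PySem.Dict.ofList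
    [ ("5g", [ (["registration", "initial ue", "ng setup"], ("registration", "Registration")),
               (["nsmf", "createsmcontext", "pdu session", "pfcp"], ("session_setup", "Session Setup")) ]),
      ("lte", [ (["attach", "initial ue", "downlink nas transport"], ("registration", "Registration")),
                (["create session", "modify bearer", "gtpv2"], ("session_setup", "Session Setup")) ]),
      ("ims", [ (["register", "401", "407", "challenge"], ("authentication", "Authentication")),
                (["invite", "183", "180", "200 ok", "bye"], ("signaling", "Call Signaling")) ]) ]

-- _token_index: one (token, priority, result) entry per token, rule position as priority
def pvTokenIndex (profile_family : String) : List (String × Int × (String × String)) :=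
  (PySem.List.enumerate ((pvFamilyRules.getD profile_family []) ++ pvGenericRules) 0).flatMap
    (fun pr => pr.2.1.map (fun token => (token, pr.1, pr.2.2)))

-- the loop body: keep the lowest-priority matching entry
def pvStep (lowered : String) (best : Option (Int × (String × String)))
    (tr : String × Int × (String × String)) : Option (Int × (String × String)) :=
  if (match best with | none => true | some b => decide (tr.2.1 < b.1)) && PySem.Str.isIn tr.1 lowered
  then some tr.2 else best

def phase_kind_py_alt (event_name : String) (status : String) (profile_family : String) : String × String :=
  let lowered := PySem.Str.lower event_name
  match (pvTokenIndex profile_family).foldl (pvStep lowered) none with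
  | none => if status == "error" then ("failure", "Failure / Retry") else ("signaling", "Signaling")
  | some b => b.2

-- ===== PRECONDITION & SPEC =====
def Spec_phase_kind_py (event_name : String) (status : String) (profile_family : String) (out : String × String) : Prop := out = phase_kind_py_alt event_name status profile_family
instance (event_name : String) (status : String) (profile_family : String) (out : String × String) : Decidable (Spec_phase_kind_py event_name status profile_family out) := by unfold Spec_phase_kind_py; infer_instance

-- ===== CLAIM (what is proved, stated in full; the proofs are below) =====
def Claim_equal_phase_kind_py : Prop := ∀ (event_name : String) (status : String) (profile_family : String), Dom_phase_kind_py event_name status profile_family → Spec_phase_kind_py event_name status profile_family (phase_kind_py event_name status profile_family)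

-- ===== LEMMAS AND PROOFS =====

-- once the accumulator holds a priority no later entry beats, the fold is constant
theorem pv_fold_frozen (lowered : String) (p : Int) (r : String × String)
    (l : List (String × Int × (String × String))) (h : ∀ x ∈ l, ¬ x.2.1 < p) :
    l.foldl (pvStep lowered) (some (p, r)) = some (p, r) := by
  induction l with
  | nil => rfl
  | cons x xs ih =>
      have hx : ¬ x.2.1 < p := h x (List.mem_cons_self)
      simp only [List.foldl_cons, pvStep, hx, decide_false, Bool.false_and]
      exact ih (fun y hy => h y (List.mem_cons_of_mem _ hy))

-- every entry of the index built from start k has priority ≥ k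
theorem pv_index_prio_ge (rules : List (List String × (String × String))) (k : Int) :
    ∀ x ∈ (PySem.List.enumerate rules k).flatMap
        (fun pr => pr.2.1.map (fun token => (token, pr.1, pr.2.2))), k ≤ x.2.1 := by
  intro x hx
  rcases List.mem_flatMap.1 hx with ⟨pr, hpr, hx2⟩
  rcases List.mem_map.1 hx2 with ⟨t, _, rfl⟩
  rcases (PySem.List.mem_enumerate_iff _ _ _).1 hpr with ⟨j, hj, rfl⟩
  simp

-- folding one rule's tokens (all priority k) from none fires iff some token matches
theorem pv_fold_one_rule (lowered : String) (tokens : List String) (k : Int) (res : String × String) :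
    (tokens.map (fun token => (token, k, res))).foldl (pvStep lowered) none =
      (if tokens.any (fun t => PySem.Str.isIn t lowered) then some (k, res) else none) := by
  induction tokens with
  | nil => rfl
  | cons t ts ih =>
      by_cases ht : PySem.Str.isIn t lowered = true
      · simp only [List.map_cons, List.foldl_cons, List.any_cons, pvStep, ht, Bool.and_true,
          if_true, Bool.true_or]
        exact pv_fold_frozen lowered k res _ (by
          intro x hx
          rcases List.mem_map.1 hx with ⟨u, _, rfl⟩
          simp)
      · rw [Bool.not_eq_true] at ht
        simp only [List.map_cons, List.foldl_cons, List.any_cons, pvStep, ht, Bool.and_false,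
          Bool.false_or]
        exact ih

-- the min-priority scan over the flat index computes the first matching rule's result
theorem pv_scan_eq_find (lowered : String) (rules : List (List String × (String × String))) (k : Int) :
    Option.map (fun b => b.2)
      (((PySem.List.enumerate rules k).flatMap
          (fun pr => pr.2.1.map (fun token => (token, pr.1, pr.2.2)))).foldl (pvStep lowered) none) =
    Option.map (fun r => r.2)
      (rules.find? (fun r => r.1.any (fun t => PySem.Str.isIn t lowered))) := by
  induction rules generalizing k with
  | nil => simp [PySem.List.enumerate_nil]
  | cons h t ih =>
      rw [PySem.List.enumerate_cons]
      simp only [List.flatMap_cons, List.foldl_append, pv_fold_one_rule, List.find?]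
      cases hh : h.1.any (fun tok => PySem.Str.isIn tok lowered) with
      | false => simpa [hh] using ih (k + 1)
      | true =>
          rw [if_pos rfl]
          rw [pv_fold_frozen lowered k h.2 _ (by
            intro x hx
            have := pv_index_prio_ge t (k + 1) x hx
            omega)]
          simp

-- B's scan, specialised to the concrete rule table of a family
theorem pv_alt_eq_find (event_name status profile_family : String) :
    phase_kind_py_alt event_name status profile_family =
      (match ((pvFamilyRules.getD profile_family []) ++ pvGenericRules).find?
              (fun r => r.1.any (fun t => PySem.Str.isIn t (PySem.Str.lower event_name))) with
       | some r => r.2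
       | none => if status == "error" then ("failure", "Failure / Retry") else ("signaling", "Signaling")) := by
  unfold phase_kind_py_alt pvTokenIndex
  have h := pv_scan_eq_find (PySem.Str.lower event_name)
    ((pvFamilyRules.getD profile_family []) ++ pvGenericRules) 0
  cases hf : ((pvFamilyRules.getD profile_family []) ++ pvGenericRules).find?
      (fun r => r.1.any (fun t => PySem.Str.isIn t (PySem.Str.lower event_name))) with
  | none =>
      rw [hf] at h
      simp only [Option.map_none, Option.map_eq_none_iff] at h
      simp only [h]
  | some r =>
      rw [hf] at h
      simp only [Option.map_some] at h
      rcases Option.map_eq_some_iff.1 h with ⟨b, hb, hbr⟩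
      simp only [hb, hbr]

-- scanning the generic rule table equals A's generic cascade
theorem pv_generic_table (lowered status : String) :
    (match pvGenericRules.find? (fun rule => rule.1.any (fun token => PySem.Str.isIn token lowered)) with
     | some rule => rule.2
     | none => if status == "error" then ("failure", "Failure / Retry") else ("signaling", "Signaling")) =
    pvGenericA lowered status := by
  unfold pvGenericRules pvGenericA
  cases h1 : ["reject", "fail", "error", "timeout", "401", "403", "500"].any (fun t => PySem.Str.isIn t lowered) <;>
  cases h2 : ["auth", "air", "aia", "aka", "eap"].any (fun t => PySem.Str.isIn t lowered) <;>
  cases h3 : ["security", "smc", "security mode"].any (fun t => PySem.Str.isIn t lowered) <;>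
  cases h4 : ["session", "createsmcontext", "create session", "pfcp"].any (fun t => PySem.Str.isIn t lowered) <;>
  cases h5 : ["register", "attach", "initial ue"].any (fun t => PySem.Str.isIn t lowered) <;>
  cases h6 : ["release", "detach", "delete session"].any (fun t => PySem.Str.isIn t lowered) <;>
    simp only [List.find?, h1, h2, h3, h4, h5, h6] <;> simp

theorem pv_fam_other (f : String) (h5 : f ≠ "5g") (hl : f ≠ "lte") (hi : f ≠ "ims") :
    pvFamilyRules.getD f [] = [] := by
  apply PySem.Dict.getD_of_not_contains
  rw [PySem.Dict.contains_eq_decide_mem_keys]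
  have : pvFamilyRules.keys = ["5g", "lte", "ims"] := by decide
  simp [this, h5, hl, hi]

set_option maxHeartbeats 1600000 in
theorem phase_kind_py_eq (event_name status profile_family : String) :
    phase_kind_py event_name status profile_family = phase_kind_py_alt event_name status profile_family := by
  rw [pv_alt_eq_find]
  simp only [phase_kind_py]
  by_cases h5 : profile_family = "5g"
  · rw [h5, show pvFamilyRules.getD "5g" [] =
      [ (["registration", "initial ue", "ng setup"], ("registration", "Registration")),
        (["nsmf", "createsmcontext", "pdu session", "pfcp"], ("session_setup", "Session Setup")) ] from by decide]
    simp only [beq_self_eq_true, if_true, List.find?_append]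
    cases ha : ["registration", "initial ue", "ng setup"].any (fun t => PySem.Str.isIn t (PySem.Str.lower event_name)) <;>
    cases hb : ["nsmf", "createsmcontext", "pdu session", "pfcp"].any (fun t => PySem.Str.isIn t (PySem.Str.lower event_name)) <;>
      simp only [List.find?, ha, hb, Option.some_or, Option.none_or] <;> first | rfl | exact (pv_generic_table _ _).symm
  · by_cases hl : profile_family = "lte"
    · rw [hl, show pvFamilyRules.getD "lte" [] =
        [ (["attach", "initial ue", "downlink nas transport"], ("registration", "Registration")),
          (["create session", "modify bearer", "gtpv2"], ("session_setup", "Session Setup")) ] from by decide]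
      simp only [beq_self_eq_true, if_true, List.find?_append, show ("lte" == "5g") = false from rfl]
      cases ha : ["attach", "initial ue", "downlink nas transport"].any (fun t => PySem.Str.isIn t (PySem.Str.lower event_name)) <;>
      cases hb : ["create session", "modify bearer", "gtpv2"].any (fun t => PySem.Str.isIn t (PySem.Str.lower event_name)) <;>
        simp only [List.find?, ha, hb, Option.some_or, Option.none_or] <;> first | rfl | exact (pv_generic_table _ _).symm
    · by_cases hi : profile_family = "ims"
      · rw [hi, show pvFamilyRules.getD "ims" [] =
          [ (["register", "401", "407", "challenge"], ("authentication", "Authentication")),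
            (["invite", "183", "180", "200 ok", "bye"], ("signaling", "Call Signaling")) ] from by decide]
        simp only [beq_self_eq_true, if_true, List.find?_append,
          show ("ims" == "5g") = false from rfl, show ("ims" == "lte") = false from rfl]
        cases ha : ["register", "401", "407", "challenge"].any (fun t => PySem.Str.isIn t (PySem.Str.lower event_name)) <;>
        cases hb : ["invite", "183", "180", "200 ok", "bye"].any (fun t => PySem.Str.isIn t (PySem.Str.lower event_name)) <;>
          simp only [List.find?, ha, hb, Option.some_or, Option.none_or] <;> first | rfl | exact (pv_generic_table _ _).symm
      · rw [pv_fam_other profile_family h5 hl hi]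
        simp only [List.nil_append, beq_iff_eq, h5, hl, hi, if_false]
        (have h := pv_generic_table (PySem.Str.lower event_name) status; simp only [beq_iff_eq] at h; exact h.symm)

-- ===== VERDICT (by name: the statement is the Claim_ definition above) =====
theorem phase_kind_py_spec : Claim_equal_phase_kind_py := by
  intro e s f _
  unfold Spec_phase_kind_py
  exact phase_kind_py_eq e s f
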